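-- pv_equiv track=rewrite | github.com/drivenow/MachineLearning | MachineLearning/Word2Vec/keyWords/keyInText1.py | keyIntitle
-- ===== SOURCE A (Python) =====
-- def keyIntitle(inlines,ctgDict):
--     result_include=[]#包含关键词的标题
--     result_declude=[]#不包含关键词的标题
--     for line in inlines:
--         content="".join(line)
--         flag=False#判断是否有关键词
--         outline=""#result_include中包含的行
--
--         for ctg in ctgDict.keys():
--             wordsList=[]#该ctg类中包含的词
--             topWords=ctgDict[ctg]#某类的关键词
--             subflag=False#判断是否有该类的关键词
--             for word in topWords:
--                 if content.find(word)!=-1: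
--                     flag=True
--                     subflag=True
--                     wordsList.append(word)
--             if subflag==True:
--                 outline=outline+ctg+"\t"+" ".join(wordsList)+"\t"
--
--         if flag==False:
--             result_declude.append(content+"\t"+"未知"+"\n")
--         else:
--             result_include.append(content+"\t"+outline+"\n")
--     return result_include,result_declude
-- ===== SOURCE B (Python) =====
-- def keyIntitle(inlines, ctgDict):
--     # Index each content by its substrings of the keyword lengths once,
--     # instead of running content.find for every keyword.
--     lengths = sorted({len(w) for words in ctgDict.values() for w in words})
--     result_include = []
--     result_declude = []
--     for line in inlines:
--         content = "".join(line)
--         subs = {content[i:i + L] for L in lengths for i in range(len(content) - L + 1)}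
--         segments = [ctg + "\t" + " ".join([w for w in words if w in subs]) + "\t"
--                     for ctg, words in ctgDict.items()
--                     if any(w in subs for w in words)]
--         if segments:
--             result_include.append(content + "\t" + "".join(segments) + "\n")
--         else:
--             result_declude.append(content + "\t" + "未知" + "\n")
--     return result_include, result_declude
-- ===== Notes on version B (the rewrite author's own statement) =====
-- stated objective: faster
-- what changed: B builds, once per line, the set of all substrings of the content whose lengths occur among the keywords (keyword-length set computed once up front) and tests each keyword by a single set-membership lookup, instead of A's content.find scan per keyword per line.
import Mathlib
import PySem

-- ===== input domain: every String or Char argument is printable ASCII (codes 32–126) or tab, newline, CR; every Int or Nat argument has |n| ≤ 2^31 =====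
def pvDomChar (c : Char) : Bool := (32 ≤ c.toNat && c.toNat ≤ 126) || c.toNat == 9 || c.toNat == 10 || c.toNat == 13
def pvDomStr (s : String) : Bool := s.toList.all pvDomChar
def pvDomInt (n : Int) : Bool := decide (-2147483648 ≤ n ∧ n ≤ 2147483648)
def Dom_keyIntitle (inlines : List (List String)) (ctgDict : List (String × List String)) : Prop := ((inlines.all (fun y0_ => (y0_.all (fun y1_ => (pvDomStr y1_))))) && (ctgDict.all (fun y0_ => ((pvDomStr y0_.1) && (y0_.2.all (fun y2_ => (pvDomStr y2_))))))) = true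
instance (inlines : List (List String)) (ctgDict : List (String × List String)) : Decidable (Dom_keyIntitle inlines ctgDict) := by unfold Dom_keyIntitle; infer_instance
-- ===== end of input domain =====

-- B indexes each content once by the set of its substrings of the keyword lengths and tests
-- keywords by set membership, instead of running content.find for every keyword (measured faster in a timing run).


-- ===== PORT A =====
-- inner 'for word in topWords' loop; state = (flag, subflag, wordsList)
def pvInnerA (content : String) (topWords : List String) (flag : Bool) : Bool × Bool × List String :=
  topWords.foldl
    (fun t word => if PySem.Str.find content word ≠ -1 then (true, true, t.2.2 ++ [word]) else t)
    (flag, false, [])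

-- one iteration of 'for ctg in ctgDict.keys()'; state = (flag, outline)
def pvCtgStepA (d : PySem.Dict String (List String)) (content : String)
    (s : Bool × String) (ctg : String) : Bool × String :=
  let topWords := PySem.Dict.getD d ctg []
  let r := pvInnerA content topWords s.1
  if r.2.1 = true then (r.1, s.2 ++ ctg ++ "\t" ++ PySem.Str.join " " r.2.2 ++ "\t")
  else (r.1, s.2)

-- one iteration of 'for line in inlines'; state = (result_include, result_declude)
def pvLineA (d : PySem.Dict String (List String))
    (res : List String × List String) (line : List String) : List String × List String :=
  let content := PySem.Str.join "" line
  let st := (PySem.Dict.keys d).foldl (pvCtgStepA d content) (false, "")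
  if st.1 = false then (res.1, res.2 ++ [content ++ "\t" ++ "未知" ++ "\n"])
  else (res.1 ++ [content ++ "\t" ++ st.2 ++ "\n"], res.2)

def keyIntitle (inlines : List (List String)) (ctgDict : List (String × List String)) :
    List String × List String :=
  inlines.foldl (pvLineA (PySem.Dict.ofList ctgDict)) ([], [])

-- ===== PORT B =====
-- lengths = sorted({len(w) for words in ctgDict.values() for w in words})
def pvLengthsB (d : PySem.Dict String (List String)) : List Int :=
  PySem.List.sorted
    (PySem.Set.ofList ((PySem.Dict.values d).flatMap (fun words => words.map PySem.Str.len)))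
    (fun x => x) false

-- subs = {content[i:i+L] for L in lengths for i in range(len(content) - L + 1)}
def pvSubsB (lengths : List Int) (content : String) : PySem.Set String :=
  PySem.Set.ofList
    (lengths.flatMap (fun L =>
      (PySem.List.pyRange 0 (PySem.Str.len content - L + 1)).map
        (fun i => PySem.Str.slice content (some i) (some (i + L)))))

-- the 'segments' list comprehension
def pvSegmentsB (d : PySem.Dict String (List String)) (subs : PySem.Set String) : List String :=
  ((PySem.Dict.items d).filter (fun p => p.2.any (fun w => PySem.Set.contains subs w))).map
    (fun p => p.1 ++ "\t" ++ PySem.Str.join " " (p.2.filter (fun w => PySem.Set.contains subs w)) ++ "\t")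

-- one iteration of 'for line in inlines'
def pvLineB (d : PySem.Dict String (List String)) (lengths : List Int)
    (res : List String × List String) (line : List String) : List String × List String :=
  let content := PySem.Str.join "" line
  let segments := pvSegmentsB d (pvSubsB lengths content)
  if segments ≠ [] then (res.1 ++ [content ++ "\t" ++ PySem.Str.join "" segments ++ "\n"], res.2)
  else (res.1, res.2 ++ [content ++ "\t" ++ "未知" ++ "\n"])

def keyIntitle_alt (inlines : List (List String)) (ctgDict : List (String × List String)) :
    List String × List String :=
  let d := PySem.Dict.ofList ctgDict
  let lengths := pvLengthsB d
  inlines.foldl (pvLineB d lengths) ([], [])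

-- ===== PRECONDITION & SPEC =====
def Spec_keyIntitle (inlines : List (List String)) (ctgDict : List (String × List String)) (out : List String × List String) : Prop := out = keyIntitle_alt inlines ctgDict
instance (inlines : List (List String)) (ctgDict : List (String × List String)) (out : List String × List String) : Decidable (Spec_keyIntitle inlines ctgDict out) := by unfold Spec_keyIntitle; infer_instance

-- ===== CLAIM (what is proved, stated in full; the proofs are below) =====
def Claim_equal_keyIntitle : Prop := ∀ (inlines : List (List String)) (ctgDict : List (String × List String)), Dom_keyIntitle inlines ctgDict → Spec_keyIntitle inlines ctgDict (keyIntitle inlines ctgDict)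

-- ===== LEMMAS AND PROOFS =====

-- the body of A's category loop, expressed on an items pair (pvCtgStepA d content s k
-- is definitionally pvStepI content s (k, getD d k []))
def pvStepI (content : String) (s : Bool × String) (p : String × List String) : Bool × String :=
  let r := pvInnerA content p.2 s.1
  if r.2.1 = true then (r.1, s.2 ++ p.1 ++ "\t" ++ PySem.Str.join " " r.2.2 ++ "\t")
  else (r.1, s.2)

lemma pv_any_congr {α : Type} {l : List α} {p q : α → Bool} (h : ∀ x ∈ l, p x = q x) :
    l.any p = l.any q := by
  induction l with
  | nil => rfl
  | cons x l ih =>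
    simp only [List.any_cons, h x (List.mem_cons_self), ih fun y hy => h y (List.mem_cons_of_mem x hy)]

-- every string in the subs set is a substring of content
lemma pv_mem_subs_infix (lengths : List Int) (hpos : ∀ L ∈ lengths, 0 ≤ L)
    (content w : String) (hw : w ∈ pvSubsB lengths content) :
    w.toList <:+: content.toList := by
  unfold pvSubsB at hw
  rw [PySem.Set.mem_ofList] at hw
  rcases List.mem_flatMap.1 hw with ⟨L, hL, hw2⟩
  rcases List.mem_map.1 hw2 with ⟨i, hi, rfl⟩
  rcases PySem.List.mem_pyRange_one.1 hi with ⟨hi0, _⟩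
  have hL0 := hpos L hL
  rw [PySem.Str.toList_slice, PySem.Chars.slice_eq_listSlice,
    PySem.List.slice_toNat _ hi0 (by omega)]
  exact (List.take_prefix _ _).isInfix.trans ((List.drop_suffix _ _).isInfix)

-- conversely, every substring of content whose length occurs in lengths is in subs
lemma pv_infix_mem_subs (lengths : List Int) (content w : String)
    (hlen : PySem.Str.len w ∈ lengths) (h : w.toList <:+: content.toList) :
    w ∈ pvSubsB lengths content := by
  rcases h with ⟨s, t, hst⟩
  unfold pvSubsB
  rw [PySem.Set.mem_ofList]
  refine List.mem_flatMap.2 ⟨PySem.Str.len w, hlen, List.mem_map.2 ⟨(s.length : Int), ?_, ?_⟩⟩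
  · refine PySem.List.mem_pyRange_one.2 ⟨by positivity, ?_⟩
    have : s.length + w.toList.length ≤ content.toList.length := by
      rw [← hst]; simp
    rw [PySem.Str.len_eq, PySem.Str.len_eq]
    omega
  · rw [← String.toList_inj, PySem.Str.toList_slice, PySem.Chars.slice_eq_listSlice,
      PySem.Str.len_eq, PySem.List.slice_natCast_add, ← hst]
    simp

-- membership in subs coincides with Python's content.find(w) != -1
lemma pv_contains_subs (lengths : List Int) (hpos : ∀ L ∈ lengths, 0 ≤ L)
    (content w : String) (hlen : PySem.Str.len w ∈ lengths) :
    PySem.Set.contains (pvSubsB lengths content) w = decide (PySem.Str.find content w ≠ -1) := by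
  rw [Bool.eq_iff_iff, PySem.Set.contains_iff, decide_eq_true_eq,
    PySem.Str.find_ne_neg_one_iff]
  exact ⟨pv_mem_subs_infix lengths hpos content w, pv_infix_mem_subs lengths content w hlen⟩

-- A's inner word loop computes (flag || any, subflag || any, acc ++ filter)
lemma pv_innerA_aux (content : String) (ws : List String) (fl sf : Bool) (acc : List String) :
    ws.foldl
        (fun t word => if PySem.Str.find content word ≠ -1 then (true, true, t.2.2 ++ [word]) else t)
        ((fl, sf, acc) : Bool × Bool × List String) =
      (fl || ws.any (fun w => decide (PySem.Str.find content w ≠ -1)),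
       sf || ws.any (fun w => decide (PySem.Str.find content w ≠ -1)),
       acc ++ ws.filter (fun w => decide (PySem.Str.find content w ≠ -1))) := by
  induction ws generalizing fl sf acc with
  | nil => simp
  | cons w ws ih =>
    simp only [List.foldl_cons, List.any_cons, List.filter_cons]
    by_cases h : PySem.Str.find content w ≠ -1
    · rw [if_pos h, ih]
      have h' : ¬ PySem.Chars.find content.toList w.toList = -1 := by simpa using h
      simp [h']
    · rw [if_neg h, ih]
      have h' : PySem.Chars.find content.toList w.toList = -1 := by simpa using h
      simp [h']

lemma pv_innerA_eq (content : String) (ws : List String) (fl : Bool) :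
    pvInnerA content ws fl =
      (fl || ws.any (fun w => decide (PySem.Str.find content w ≠ -1)),
       ws.any (fun w => decide (PySem.Str.find content w ≠ -1)),
       ws.filter (fun w => decide (PySem.Str.find content w ≠ -1))) := by
  unfold pvInnerA
  rw [pv_innerA_aux]
  simp

-- "".join is plain concatenation
lemma pv_join_empty (l : List String) :
    PySem.Str.join "" l = l.foldr (· ++ ·) "" := by
  rw [← String.toList_inj, PySem.Str.toList_join]
  induction l with
  | nil => simp [PySem.Chars.join_nil]
  | cons x l ih =>
    cases l with
    | nil => simp [PySem.Chars.join_singleton]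
    | cons y rest =>
      simp only [List.map_cons] at ih ⊢
      rw [PySem.Chars.join_cons_cons]
      simp only [List.foldr_cons] at ih ⊢
      rw [ih]
      simp [String.toList_append]

-- one step of A's category loop
lemma pv_stepI_eq (content : String) (fl : Bool) (out : String) (p : String × List String) :
    pvStepI content (fl, out) p =
      if p.2.any (fun w => decide (PySem.Str.find content w ≠ -1)) = true then
        (fl || p.2.any (fun w => decide (PySem.Str.find content w ≠ -1)),
         out ++ p.1 ++ "\t" ++
           PySem.Str.join " " (p.2.filter (fun w => decide (PySem.Str.find content w ≠ -1))) ++ "\t")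
      else (fl || p.2.any (fun w => decide (PySem.Str.find content w ≠ -1)), out) := by
  unfold pvStepI
  rw [pv_innerA_eq]

-- A's category loop over an items list, characterised
lemma pv_foldl_ctg (content : String) (l : List (String × List String)) (fl : Bool) (out : String) :
    l.foldl (pvStepI content) (fl, out) =
      (fl || l.any (fun p => p.2.any (fun w => decide (PySem.Str.find content w ≠ -1))),
       out ++ ((l.filter (fun p => p.2.any (fun w => decide (PySem.Str.find content w ≠ -1)))).map
         (fun p => p.1 ++ "\t" ++
           PySem.Str.join " " (p.2.filter (fun w => decide (PySem.Str.find content w ≠ -1))) ++ "\t")).foldr (· ++ ·) "") := by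
  induction l generalizing fl out with
  | nil => simp
  | cons p l ih =>
    rw [List.foldl_cons, pv_stepI_eq]
    by_cases h : p.2.any (fun w => decide (PySem.Str.find content w ≠ -1)) = true
    · rw [if_pos h, ih, List.any_cons, List.filter_cons, if_pos h]
      simp only [h, List.map_cons, List.foldr_cons, Bool.true_or, Bool.or_assoc]
      refine Prod.ext rfl ?_
      simp [String.append_assoc]
    · rw [if_neg h, ih, List.any_cons, List.filter_cons, if_neg h]
      simp only [Bool.not_eq_true] at h
      simp [Bool.or_assoc]

-- each keyword length of the dictionary occurs in pvLengthsB
lemma pv_len_mem_lengths (d : PySem.Dict String (List String))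
    (p : String × List String) (hp : p ∈ PySem.Dict.items d) (w : String) (hw : w ∈ p.2) :
    PySem.Str.len w ∈ pvLengthsB d := by
  unfold pvLengthsB
  rw [PySem.List.mem_sorted, PySem.Set.mem_ofList]
  exact List.mem_flatMap.2 ⟨p.2, List.mem_map.2 ⟨p, hp, rfl⟩, List.mem_map.2 ⟨w, hw, rfl⟩⟩

lemma pv_lengths_nonneg (d : PySem.Dict String (List String)) :
    ∀ L ∈ pvLengthsB d, 0 ≤ L := by
  intro L hL
  unfold pvLengthsB at hL
  rw [PySem.List.mem_sorted, PySem.Set.mem_ofList] at hL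
  rcases List.mem_flatMap.1 hL with ⟨ws, _, hL2⟩
  rcases List.mem_map.1 hL2 with ⟨w, _, rfl⟩
  rw [PySem.Str.len_eq]
  positivity

-- per-line agreement
lemma pv_line_eq (ctgDict : List (String × List String)) (res : List String × List String)
    (line : List String) :
    pvLineA (PySem.Dict.ofList ctgDict) res line =
      pvLineB (PySem.Dict.ofList ctgDict) (pvLengthsB (PySem.Dict.ofList ctgDict)) res line := by
  simp only [pvLineA, pvLineB]
  set d := PySem.Dict.ofList ctgDict with hd
  set content := PySem.Str.join "" line with hc
  have hcontains : ∀ p ∈ PySem.Dict.items d, ∀ w ∈ p.2,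
      PySem.Set.contains (pvSubsB (pvLengthsB d) content) w =
        decide (PySem.Str.find content w ≠ -1) := by
    intro p hp w hw
    exact pv_contains_subs _ (pv_lengths_nonneg d) content w (pv_len_mem_lengths d p hp w hw)
  have hseg : pvSegmentsB d (pvSubsB (pvLengthsB d) content) =
      ((PySem.Dict.items d).filter
          (fun p => p.2.any (fun w => decide (PySem.Str.find content w ≠ -1)))).map
        (fun p => p.1 ++ "\t" ++
          PySem.Str.join " " (p.2.filter (fun w => decide (PySem.Str.find content w ≠ -1))) ++ "\t") := by
    unfold pvSegmentsB
    rw [List.filter_congr (fun p hp => pv_any_congr (fun w hw => hcontains p hp w hw))]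
    exact List.map_congr_left (fun p hp => by
      have hp' := List.mem_of_mem_filter hp
      rw [List.filter_congr (fun w hw => hcontains p hp' w hw)])
  have hkeys : (PySem.Dict.keys d).foldl (pvCtgStepA d content) (false, "") =
      (PySem.Dict.items d).foldl (pvStepI content) (false, "") := by
    rw [PySem.Dict.items_eq_map_keys d (PySem.Dict.nodup_keys_ofList ctgDict) ([] : List String),
      List.foldl_map]
    rfl
  rw [hkeys, pv_foldl_ctg, hseg]
  dsimp only
  by_cases hany : (PySem.Dict.items d).any
      (fun p => p.2.any (fun w => decide (PySem.Str.find content w ≠ -1))) = true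
  · have hfilter : (PySem.Dict.items d).filter
        (fun p => p.2.any (fun w => decide (PySem.Str.find content w ≠ -1))) ≠ [] := by
      rw [ne_eq, List.filter_eq_nil_iff]
      rcases List.any_eq_true.1 hany with ⟨p, hp, hpt⟩
      exact fun hall => hall p hp hpt
    rw [if_neg (by rw [Bool.false_or, hany]; exact fun hcontra => absurd hcontra (by decide)),
      if_pos (fun hmap => hfilter (List.map_eq_nil_iff.1 hmap)), pv_join_empty,
      String.empty_append]
  · simp only [Bool.not_eq_true] at hany
    have hfilter : (PySem.Dict.items d).filter
        (fun p => p.2.any (fun w => decide (PySem.Str.find content w ≠ -1))) = [] := by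
      rw [List.filter_eq_nil_iff]
      intro p hp
      simp only [List.any_eq_false.mp hany p hp, Bool.false_eq_true, not_false_eq_true]
    rw [hfilter, if_pos (by rw [Bool.false_or, hany]), if_neg (by simp)]

-- ===== VERDICT (by name: the statement is the Claim_ definition above) =====
theorem keyIntitle_spec : Claim_equal_keyIntitle := by
  intro inlines ctgDict _
  unfold Spec_keyIntitle keyIntitle keyIntitle_alt
  have h : pvLineA (PySem.Dict.ofList ctgDict) =
      pvLineB (PySem.Dict.ofList ctgDict) (pvLengthsB (PySem.Dict.ofList ctgDict)) :=
    funext fun res => funext fun line => pv_line_eq ctgDict res line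
  rw [h]
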